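-- pv_equiv track=rewrite | github.com/Hikari-desuyoo/periodic-sequences | binary_number.py | pack_sequences_together
-- ===== SOURCE A (Python) =====
-- def pack_sequences_together(array):
--     track_digit = array[0]
--     packs = []
--     for element in array:
--         if element == track_digit:
--             packs.append(element)
--         else:
--             packs[-1] += element
--     return packs
-- ===== SOURCE B (Python) =====
-- def pack_sequences_together(array):
--     first = array[0]
--     out = []
--     n = len(array)
--     i = 0
--     while i < n:
--         j = i + 1
--         while j < n and array[j] != first:
--             j += 1
--         out.append("".join(array[i:j]))
--         i = j
--     return out
-- ===== Notes on version B (the rewrite author's own statement) =====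
-- stated objective: alternative
-- what changed: A grows packs in one interleaved pass, appending on a match and mutating packs[-1] otherwise; B instead scans forward to each pack's boundary (next element equal to array[0]) and joins that whole slice, an outer loop over segments with an inner boundary scan.
import Mathlib
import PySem

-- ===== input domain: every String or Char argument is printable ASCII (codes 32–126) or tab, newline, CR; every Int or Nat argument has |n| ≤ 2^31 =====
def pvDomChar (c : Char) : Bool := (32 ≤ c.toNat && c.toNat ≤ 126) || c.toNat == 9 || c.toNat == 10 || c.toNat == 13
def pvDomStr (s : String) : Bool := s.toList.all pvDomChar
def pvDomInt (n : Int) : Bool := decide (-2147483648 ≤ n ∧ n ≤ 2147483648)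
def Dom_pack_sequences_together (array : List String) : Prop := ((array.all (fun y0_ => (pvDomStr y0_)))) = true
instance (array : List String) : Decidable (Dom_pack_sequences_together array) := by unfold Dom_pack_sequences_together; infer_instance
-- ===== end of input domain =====

-- B finds each pack's boundary first and joins the slice, instead of A's growing the last pack in place; objective: simpler/alternative decomposition (return value only; A raises IndexError on [], excluded by Pre_).

-- ===== PORT A =====
-- `packs[-1] += element`: dropLast ++ [last ++ element]; the empty-packs case (Python IndexError) is unreachable under Pre_.
def pack_sequences_together (array : List String) : List String :=
  match array with
  | [] => []   -- Python raises IndexError here (array[0]); excluded by Pre_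
  | a0 :: _ =>
    array.foldl (fun packs element =>
      if element == a0 then packs ++ [element]
      else packs.dropLast ++ [(packs.getLast?.getD "") ++ element]) []

-- ===== PORT B =====
-- inner while loop: scan forward while element ≠ first (takeWhile/dropWhile); outer loop: recursion on the remaining list.
def pvSegs (first : String) : List String → List String
  | [] => []
  | e :: rest =>
    PySem.Str.join "" (e :: rest.takeWhile (fun x => x != first)) ::
      pvSegs first (rest.dropWhile (fun x => x != first))
termination_by l => l.length
decreasing_by
  simp only [List.length_cons]
  exact Nat.lt_succ_of_le (List.length_dropWhile_le _ _)

def pack_sequences_together_alt (array : List String) : List String :=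
  match array with
  | [] => []   -- Python raises IndexError here (array[0]); excluded by Pre_
  | a0 :: _ => pvSegs a0 array

-- ===== PRECONDITION & SPEC =====
-- A evaluates array[0] first: on the empty list Python raises IndexError, so it is excluded.
def Pre_pack_sequences_together (array : List String) : Prop := array ≠ []
instance (array : List String) : Decidable (Pre_pack_sequences_together array) := by unfold Pre_pack_sequences_together; infer_instance
def pvWitness_pack_sequences_together : List String := ["1", "0", "0", "1", "x"]

def Spec_pack_sequences_together (array : List String) (out : List String) : Prop := out = pack_sequences_together_alt array
instance (array : List String) (out : List String) : Decidable (Spec_pack_sequences_together array out) := by unfold Spec_pack_sequences_together; infer_instance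

-- ===== CLAIM (what is proved, stated in full; the proofs are below) =====
def Claim_equal_pack_sequences_together : Prop := ∀ (array : List String), Dom_pack_sequences_together array → Pre_pack_sequences_together array → Spec_pack_sequences_together array (pack_sequences_together array)

-- ===== LEMMAS AND PROOFS =====

theorem pvIntercalate_nil (l : List (List Char)) :
    ([] : List Char).intercalate l = l.flatten := by
  induction l with
  | nil => simp [List.intercalate]
  | cons a t ih =>
    cases t with
    | nil => simp [List.intercalate]
    | cons b u =>
      simp only [List.intercalate, List.intersperse] at *
      simp_all [List.flatten]

theorem pvJoin_empty_cons (x : String) (xs : List String) :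
    PySem.Str.join "" (x :: xs) = x ++ PySem.Str.join "" xs := by
  apply String.toList_injective
  simp [PySem.Str.join, PySem.Chars.join, pvIntercalate_nil]

theorem pvFold_inv (a0 : String) (l acc : List String) (cur : String) :
    l.foldl (fun packs element =>
      if element == a0 then packs ++ [element]
      else packs.dropLast ++ [(packs.getLast?.getD "") ++ element]) (acc ++ [cur])
    = acc ++ (cur ++ PySem.Str.join "" (l.takeWhile (fun x => x != a0))) ::
        pvSegs a0 (l.dropWhile (fun x => x != a0)) := by
  induction l generalizing acc cur with
  | nil =>
    simp [PySem.Str.join, PySem.Chars.join, pvSegs]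
    apply String.toList_injective; simp [List.intercalate]
  | cons e t ih =>
    simp only [List.foldl_cons]
    by_cases he : e = a0
    · subst he
      simp only [beq_self_eq_true, if_true, List.takeWhile_cons, List.dropWhile_cons,
        bne_self_eq_false, Bool.false_eq_true, if_false, PySem.Str.join]
      rw [ih (acc ++ [cur]) e]
      simp [pvSegs, pvJoin_empty_cons, List.append_assoc]
    · have hbeq : (e == a0) = false := beq_eq_false_iff_ne.mpr he
      have hbne : (e != a0) = true := by simp [bne, hbeq]
      simp only [hbeq, Bool.false_eq_true, if_false, List.dropLast_concat,
        List.getLast?_concat, Option.getD_some, List.takeWhile_cons, List.dropWhile_cons,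
        hbne, if_true]
      rw [ih acc (cur ++ e)]
      simp [pvJoin_empty_cons, String.append_assoc]

-- ===== VERDICT (by name: the statement is the Claim_ definition above) =====
theorem pack_sequences_together_spec : Claim_equal_pack_sequences_together := by
  intro array _ hpre
  unfold Spec_pack_sequences_together
  match array with
  | [] => exact absurd rfl hpre
  | a0 :: rest =>
    show (a0 :: rest).foldl _ [] = pack_sequences_together_alt (a0 :: rest)
    simp only [List.foldl_cons, beq_self_eq_true, if_true, List.nil_append]
    rw [show ([a0] : List String) = [] ++ [a0] from rfl, pvFold_inv a0 rest [] a0]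
    simp [pack_sequences_together_alt, pvSegs, pvJoin_empty_cons]
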